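-- pv_equiv track=rewrite | github.com/syedareehaquasar/Game-Of-Life | GameOfLife.py | gridToString
-- ===== SOURCE A (Python) =====
-- from collections import namedtuple, defaultdict
--
-- Cell = namedtuple('Cell', ['x', 'y'])
--
-- def gridToString(grid, padding=0):
--     grid_str = ""
--     xs = [x for (x, y) in grid]
--     ys = [y for (x, y) in grid]
--     for y in range(min(ys) - padding, max(ys) + 1 + padding):
--         for x in range(min(xs) - padding, max(xs) + 1 + padding):
--             grid_str += '1' if Cell(x, y) in grid else '0'
--         grid_str += '\n'
--     return grid_str.strip()
-- ===== SOURCE B (Python) =====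
-- def gridToString(grid, padding=0):
--     xs = [x for (x, y) in grid]
--     ys = [y for (x, y) in grid]
--     offx = min(xs) - padding
--     offy = min(ys) - padding
--     width = max(xs) + 1 + padding - offx
--     height = max(ys) + 1 + padding - offy
--     if width <= 0 or height <= 0:
--         return ""
--     buf = [['0'] * width for _ in range(height)]
--     for (x, y) in grid:
--         col = x - offx
--         row = y - offy
--         if 0 <= col < width and 0 <= row < height:
--             buf[row][col] = '1'
--     return '\n'.join(''.join(r) for r in buf)
-- ===== Notes on version B (the rewrite author's own statement) =====
-- stated objective: alternative
-- what changed: B computes the same bounding box but scatters each live cell into a preallocated height-by-width buffer of '0' rows and joins the rows, instead of scanning every position of the box and probing list membership per position.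
import Mathlib
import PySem

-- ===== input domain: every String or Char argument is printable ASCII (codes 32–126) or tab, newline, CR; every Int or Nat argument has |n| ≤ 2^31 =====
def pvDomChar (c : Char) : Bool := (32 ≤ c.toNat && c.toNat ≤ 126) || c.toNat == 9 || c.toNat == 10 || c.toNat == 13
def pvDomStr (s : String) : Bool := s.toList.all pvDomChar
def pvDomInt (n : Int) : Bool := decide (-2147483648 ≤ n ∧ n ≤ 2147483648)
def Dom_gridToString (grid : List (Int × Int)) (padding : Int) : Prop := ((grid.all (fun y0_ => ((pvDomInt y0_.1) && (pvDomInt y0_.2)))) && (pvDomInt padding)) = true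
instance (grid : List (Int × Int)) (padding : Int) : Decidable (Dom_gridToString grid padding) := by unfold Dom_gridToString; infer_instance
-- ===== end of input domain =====

-- B scatters the live cells into a preallocated character grid instead of probing membership
-- at every position of the bounding box (objective: alternative; same result, different traversal).


-- ===== PORT A =====
-- literal transliteration of A: scan every (x, y) of the padded bounding box, append '1'/'0'
-- by membership in grid, '\n' after each row, then strip.
def gridToString (grid : List (Int × Int)) (padding : Int) : String :=
  let xs := grid.map (fun p => p.1)
  let ys := grid.map (fun p => p.2)
  let chars :=
    (PySem.List.pyRange (((PySem.List.min? ys (fun v => v)).getD 0) - padding)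
        (((PySem.List.max? ys (fun v => v)).getD 0) + 1 + padding) 1).foldl
      (fun acc y =>
        ((PySem.List.pyRange (((PySem.List.min? xs (fun v => v)).getD 0) - padding)
            (((PySem.List.max? xs (fun v => v)).getD 0) + 1 + padding) 1).foldl
          (fun acc2 x => acc2 ++ [if grid.contains (x, y) then '1' else '0']) acc) ++ ['\n'])
      []
  String.ofList (PySem.Chars.strip chars)

-- ===== PORT B =====
-- literal transliteration of B: allocate a height×width buffer of '0', scatter each live cell
-- that falls inside the viewport, join the rows with '\n'.
def gridToString_alt (grid : List (Int × Int)) (padding : Int) : String :=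
  let xs := grid.map (fun p => p.1)
  let ys := grid.map (fun p => p.2)
  let offx := (PySem.List.min? xs (fun v => v)).getD 0 - padding
  let offy := (PySem.List.min? ys (fun v => v)).getD 0 - padding
  let width := (PySem.List.max? xs (fun v => v)).getD 0 + 1 + padding - offx
  let height := (PySem.List.max? ys (fun v => v)).getD 0 + 1 + padding - offy
  if width ≤ 0 ∨ height ≤ 0 then "" else
    let buf0 := List.replicate height.toNat (List.replicate width.toNat '0')
    let buf := grid.foldl (fun buf c =>
      let col := c.1 - offx
      let row := c.2 - offy
      if 0 ≤ col ∧ col < width ∧ 0 ≤ row ∧ row < height then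
        buf.set row.toNat ((buf.getD row.toNat []).set col.toNat '1')
      else buf) buf0
    String.ofList (PySem.Chars.join ['\n'] buf)

-- ===== PRECONDITION & SPEC =====
-- Python A raises ValueError (min of an empty sequence) on the empty grid; Pre_ excludes it.
def Pre_gridToString (grid : List (Int × Int)) (padding : Int) : Prop := grid ≠ []
instance (grid : List (Int × Int)) (padding : Int) : Decidable (Pre_gridToString grid padding) := by unfold Pre_gridToString; infer_instance
def pvWitness_gridToString : (List (Int × Int)) × Int := ([(0, 0), (2, 1)], 1)

def Spec_gridToString (grid : List (Int × Int)) (padding : Int) (out : String) : Prop := out = gridToString_alt grid padding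
instance (grid : List (Int × Int)) (padding : Int) (out : String) : Decidable (Spec_gridToString grid padding out) := by unfold Spec_gridToString; infer_instance

-- ===== CLAIM (what is proved, stated in full; the proofs are below) =====
def Claim_equal_gridToString : Prop := ∀ (grid : List (Int × Int)) (padding : Int), Dom_gridToString grid padding → Pre_gridToString grid padding → Spec_gridToString grid padding (gridToString grid padding)

-- ===== LEMMAS AND PROOFS =====

-- the common picture both programs paint: one row per y of the viewport, '1' where a live cell sits
def pvRows (g : List (Int × Int)) (xa xb ya yb : Int) : List (List Char) :=
  (PySem.List.pyRange ya yb 1).map (fun y =>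
    (PySem.List.pyRange xa xb 1).map (fun x => if g.contains (x, y) then '1' else '0'))

theorem pvRows_nil (xa xb ya yb : Int) :
    pvRows [] xa xb ya yb =
      List.replicate (yb - ya).toNat (List.replicate (xb - xa).toNat '0') := by
  simp [pvRows, List.map_const', PySem.List.length_pyRange_one]

-- setting position (i - a) of a row indexed by pyRange a b rewrites the generating function at i
theorem pvSet_map_pyRange {α : Type} (a b i : Int) (hi : a ≤ i ∧ i < b) (g : Int → α) (v : α) :
    ((PySem.List.pyRange a b 1).map g).set (i - a).toNat v
      = (PySem.List.pyRange a b 1).map (fun x => if x = i then v else g x) := by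
  apply List.ext_getElem
  · simp
  · intro k h1 h2
    simp only [List.getElem_set, List.getElem_map]
    rw [PySem.List.getElem_pyRange_one]
    have hlen : k < (b - a).toNat := by
      simpa [PySem.List.length_pyRange_one] using h2
    by_cases hk : (i - a).toNat = k
    · simp [hk, show a + (k : Int) = i by omega]
    · rw [if_neg hk, if_neg (by omega)]

-- one scatter step turns the picture of s into the picture of s ++ [c]
theorem pvStep (xa xb ya yb : Int) (s : List (Int × Int)) (c : Int × Int) :
    (if 0 ≤ c.1 - xa ∧ c.1 - xa < xb - xa ∧ 0 ≤ c.2 - ya ∧ c.2 - ya < yb - ya then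
        (pvRows s xa xb ya yb).set (c.2 - ya).toNat
          (((pvRows s xa xb ya yb).getD (c.2 - ya).toNat []).set (c.1 - xa).toNat '1')
      else pvRows s xa xb ya yb)
      = pvRows (s ++ [c]) xa xb ya yb := by
  by_cases hc : 0 ≤ c.1 - xa ∧ c.1 - xa < xb - xa ∧ 0 ≤ c.2 - ya ∧ c.2 - ya < yb - ya
  · rw [if_pos hc]
    obtain ⟨h1, h2, h3, h4⟩ := hc
    have hrow : (pvRows s xa xb ya yb).getD (c.2 - ya).toNat []
        = (PySem.List.pyRange xa xb 1).map (fun x => if s.contains (x, c.2) then '1' else '0') := by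
      have hk : (c.2 - ya).toNat < (PySem.List.pyRange ya yb 1).length := by
        rw [PySem.List.length_pyRange_one]; omega
      rw [pvRows, List.getD_eq_getElem _ _ (by simpa using hk)]
      rw [List.getElem_map, PySem.List.getElem_pyRange_one _ _ _ hk,
        show ya + ((c.2 - ya).toNat : Int) = c.2 by omega]
    rw [hrow, pvSet_map_pyRange xa xb c.1 (by omega)]
    rw [pvRows, pvRows, pvSet_map_pyRange ya yb c.2 (by omega)]
    apply List.map_congr_left
    intro y hy
    by_cases hyc : y = c.2
    · rw [if_pos hyc, hyc]
      apply List.map_congr_left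
      intro x hx
      by_cases hxc : x = c.1
      · simp [hxc]
      · have hne : ¬ ((x, c.2) = c) := fun h => hxc (congrArg Prod.fst h)
        simp [if_neg hxc, hne]
    · rw [if_neg hyc]
      apply List.map_congr_left
      intro x hx
      have hne : ¬ ((x, y) = c) := fun h => hyc (congrArg Prod.snd h)
      simp [hne]
  · rw [if_neg hc]
    rw [pvRows, pvRows]
    apply List.map_congr_left
    intro y hy
    apply List.map_congr_left
    intro x hx
    rw [PySem.List.mem_pyRange_one] at hy hx
    have hne : ¬ ((x, y) = c) := by
      intro h
      have hx1 : x = c.1 := congrArg Prod.fst h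
      have hy1 : y = c.2 := congrArg Prod.snd h
      omega
    simp [hne]

-- scatter invariant: folding B's per-cell update over l from the picture of s paints s ++ l
theorem pvScatter (xa xb ya yb : Int) (l s : List (Int × Int)) :
    l.foldl (fun buf c =>
        if 0 ≤ c.1 - xa ∧ c.1 - xa < xb - xa ∧ 0 ≤ c.2 - ya ∧ c.2 - ya < yb - ya then
          buf.set (c.2 - ya).toNat ((buf.getD (c.2 - ya).toNat []).set (c.1 - xa).toNat '1')
        else buf) (pvRows s xa xb ya yb)
      = pvRows (s ++ l) xa xb ya yb := by
  induction l generalizing s with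
  | nil => simp
  | cons c t ih =>
    rw [List.foldl_cons, pvStep, ih (s ++ [c])]
    simp

theorem pvJoin_append_singleton (rs : List (List Char)) (r : List Char) (h : rs ≠ []) :
    PySem.Chars.join ['\n'] (rs ++ [r]) = PySem.Chars.join ['\n'] rs ++ ['\n'] ++ r := by
  induction rs with
  | nil => simp at h
  | cons a t ih =>
    cases t with
    | nil => simp [PySem.Chars.join_singleton, PySem.Chars.join_cons_cons]
    | cons b t' =>
      rw [List.cons_append, List.cons_append, PySem.Chars.join_cons_cons,
        PySem.Chars.join_cons_cons, ← List.cons_append, ih (by simp)]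
      simp

theorem pvFlatMap_eq_join (rs : List (List Char)) (h : rs ≠ []) :
    rs.flatMap (fun r => r ++ ['\n']) = PySem.Chars.join ['\n'] rs ++ ['\n'] := by
  induction rs with
  | nil => simp at h
  | cons a t ih =>
    cases t with
    | nil => simp [PySem.Chars.join_singleton]
    | cons b t' =>
      rw [List.flatMap_cons, ih (by simp), PySem.Chars.join_cons_cons]
      simp

theorem pvDropWhile_all_false (l : List Char) (h : ∀ c ∈ l, PySem.Chars.isspace c = false) :
    l.dropWhile PySem.Chars.isspace = l := by
  rw [List.dropWhile_eq_self_iff]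
  intro hl
  simp [h _ (List.getElem_mem hl)]

theorem pvStrip_all_space (l : List Char) (h : ∀ c ∈ l, PySem.Chars.isspace c = true) :
    PySem.Chars.strip l = [] := by
  have h1 : l.dropWhile PySem.Chars.isspace = [] := by
    rw [List.dropWhile_eq_nil_iff]
    exact h
  simp [PySem.Chars.strip, PySem.Chars.lstrip, PySem.Chars.rstrip, h1]

-- strip of "rows, each followed by '\n'" is exactly the rows joined by '\n'
theorem pvStrip_rows (rs : List (List Char)) (hne : rs ≠ [])
    (h : ∀ r ∈ rs, r ≠ [] ∧ ∀ c ∈ r, PySem.Chars.isspace c = false) :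
    PySem.Chars.strip (rs.flatMap (fun r => r ++ ['\n'])) = PySem.Chars.join ['\n'] rs := by
  have hl : PySem.Chars.lstrip (rs.flatMap (fun r => r ++ ['\n'])) = rs.flatMap (fun r => r ++ ['\n']) := by
    obtain ⟨r0, t, rfl⟩ : ∃ r0 t, rs = r0 :: t := by
      cases rs with | nil => exact absurd rfl hne | cons a t => exact ⟨a, t, rfl⟩
    obtain ⟨hr0, hch⟩ := h r0 (by simp)
    obtain ⟨c, r0', rfl⟩ : ∃ c r0', r0 = c :: r0' := by
      cases r0 with | nil => exact absurd rfl hr0 | cons c r0' => exact ⟨c, r0', rfl⟩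
    simp [PySem.Chars.lstrip, hch c (by simp)]
  rw [PySem.Chars.strip, hl]
  obtain ⟨rs', r, rfl⟩ := (List.eq_nil_or_concat rs).resolve_left hne
  rw [List.concat_eq_append] at *
  obtain ⟨hr, hch⟩ := h r (by simp)
  have hflat : (rs' ++ [r]).flatMap (fun r => r ++ ['\n'])
      = rs'.flatMap (fun r => r ++ ['\n']) ++ (r ++ ['\n']) := by simp
  rw [hflat, PySem.Chars.rstrip]
  rw [List.reverse_append, List.reverse_append]
  have hrev : ∀ c ∈ r.reverse, PySem.Chars.isspace c = false := by
    intro c hc; exact hch c (List.mem_reverse.mp hc)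
  have hdropr : r.reverse.dropWhile PySem.Chars.isspace = r.reverse := pvDropWhile_all_false _ hrev
  have hnil : (r.reverse.dropWhile PySem.Chars.isspace).isEmpty = false := by
    rw [hdropr]; simpa using hr
  simp only [show (['\n'] : List Char).reverse = ['\n'] from rfl, List.cons_append,
    List.nil_append]
  rw [List.dropWhile_cons]
  norm_num [show PySem.Chars.isspace '\n' = true from rfl]
  rw [List.dropWhile_append, hnil]
  simp only [Bool.false_eq_true, if_false]
  rw [hdropr, List.reverse_append, List.reverse_reverse, List.reverse_reverse]
  cases hrs' : rs' with
  | nil => simp [PySem.Chars.join_singleton]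
  | cons a t =>
    rw [← hrs', pvFlatMap_eq_join rs' (by simp [hrs']), pvJoin_append_singleton rs' r (by simp [hrs'])]

-- the core equivalence, for arbitrary viewport bounds
theorem pvCore (g : List (Int × Int)) (xa xb ya yb : Int) :
    PySem.Chars.strip
        ((PySem.List.pyRange ya yb 1).foldl
          (fun acc y =>
            ((PySem.List.pyRange xa xb 1).foldl
              (fun acc2 x => acc2 ++ [if g.contains (x, y) then '1' else '0']) acc) ++ ['\n'])
          [])
      = if xb - xa ≤ 0 ∨ yb - ya ≤ 0 then []
        else PySem.Chars.join ['\n']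
          (g.foldl (fun buf c =>
              if 0 ≤ c.1 - xa ∧ c.1 - xa < xb - xa ∧ 0 ≤ c.2 - ya ∧ c.2 - ya < yb - ya then
                buf.set (c.2 - ya).toNat ((buf.getD (c.2 - ya).toNat []).set (c.1 - xa).toNat '1')
              else buf)
            (List.replicate (yb - ya).toNat (List.replicate (xb - xa).toNat '0'))) := by
  by_cases hy : yb ≤ ya
  · rw [PySem.List.pyRange_one_eq_nil hy, List.foldl_nil, if_pos (Or.inr (by omega))]
    rfl
  · by_cases hx : xb ≤ xa
    · rw [if_pos (Or.inl (by omega)), PySem.List.pyRange_one_eq_nil hx]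
      simp only [List.foldl_nil]
      rw [PySem.List.foldl_append_eq_flatMap (fun _ => ['\n'])]
      apply pvStrip_all_space
      intro c hc
      simp only [List.nil_append, List.mem_flatMap, List.mem_singleton] at hc
      obtain ⟨y, _, rfl⟩ := hc
      decide
    · rw [if_neg (by omega)]
      simp only [PySem.List.foldl_append_singleton_eq_map, List.append_assoc]
      rw [PySem.List.foldl_append_eq_flatMap
        (fun y => (PySem.List.pyRange xa xb 1).map
          (fun x => if g.contains (x, y) then '1' else '0') ++ ['\n'])]
      rw [List.nil_append]
      rw [← pvRows_nil, pvScatter, List.nil_append]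
      have hfm : (PySem.List.pyRange ya yb 1).flatMap
          (fun y => (PySem.List.pyRange xa xb 1).map
            (fun x => if g.contains (x, y) then '1' else '0') ++ ['\n'])
          = (pvRows g xa xb ya yb).flatMap (fun r => r ++ ['\n']) := by
        rw [pvRows, List.flatMap_map]
      rw [hfm]
      apply pvStrip_rows
      · rw [pvRows]
        intro hnil
        have := congrArg List.length hnil
        simp [PySem.List.length_pyRange_one] at this
        omega
      · intro r hr
        rw [pvRows] at hr
        simp only [List.mem_map] at hr
        obtain ⟨y, hy', rfl⟩ := hr
        constructor
        · intro hnil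
          have := congrArg List.length hnil
          simp [PySem.List.length_pyRange_one] at this
          omega
        · intro c hc
          simp only [List.mem_map] at hc
          obtain ⟨x, hx', rfl⟩ := hc
          split <;> decide

-- ===== VERDICT (by name: the statement is the Claim_ definition above) =====
theorem gridToString_spec : Claim_equal_gridToString := by
  intro grid padding _ _
  unfold Spec_gridToString gridToString gridToString_alt
  simp only []
  rw [pvCore]
  split_ifs with h
  · rfl
  · rfl
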